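-- pv_equiv track=rewrite | github.com/leeminseok11/ssafy_0313 | algorithm_과제/0206/회문1.py | count_col
-- ===== SOURCE A (Python) =====
-- def count_col(arr, N, M):
--     cnt = 0
--     for i in range(N):
--         for j in range(N - M + 1):
--             flag = 1
--             for k in range(M // 2):
--                 if arr[j + k][i] != arr[j + M - 1 - k][i]:
--                     flag = 0
--                     break
--             if flag: cnt += 1
--     return cnt
-- ===== SOURCE B (Python) =====
-- def count_col(arr, N, M):
--     if N <= 0 or M > N:
--         return 0
--     if M <= 1:
--         return N * (N - M + 1)
--     total = 0
--     for i in range(N):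
--         col = [row[i] for row in arr[:N]]
--         # layered DP: ok[j] says the length-L window of the column starting at j
--         # is a palindrome; grow all windows two characters per layer.
--         L = M % 2
--         ok = [True] * (N - L + 1)
--         while L < M:
--             L += 2
--             ok = [col[j] == col[j + L - 1] and ok[j + 1] for j in range(N - L + 1)]
--         total += sum(ok)
--     return total
-- ===== Notes on version B (the rewrite author's own statement) =====
-- stated objective: alternative
-- what changed: B replaces A's per-window mirrored-pair scan by a layered dynamic program per column: starting from the trivial length-(M mod 2) windows it grows every window two characters per layer (pal(j,L) = col[j]==col[j+L-1] and pal(j+1,L-2)), and handles the degenerate cases (N<=0, M>N, M<=1) by closed forms.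
-- outside the precondition, e.g. on count_col(['abc', 'x', 'xyz'], 3, 3): A returns 0, B raises IndexError
import Mathlib
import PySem

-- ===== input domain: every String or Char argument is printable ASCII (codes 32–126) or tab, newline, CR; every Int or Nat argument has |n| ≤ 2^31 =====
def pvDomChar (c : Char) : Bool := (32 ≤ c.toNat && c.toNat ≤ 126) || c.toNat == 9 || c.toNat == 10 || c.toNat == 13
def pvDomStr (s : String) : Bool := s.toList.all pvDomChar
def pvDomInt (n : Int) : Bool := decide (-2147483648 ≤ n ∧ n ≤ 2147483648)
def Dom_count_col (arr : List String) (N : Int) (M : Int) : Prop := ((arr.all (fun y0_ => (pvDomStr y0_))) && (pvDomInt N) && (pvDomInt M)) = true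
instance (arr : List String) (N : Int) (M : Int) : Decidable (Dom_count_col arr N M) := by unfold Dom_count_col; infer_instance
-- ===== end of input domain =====

-- B replaces A's per-window mirrored-pair scan by a per-column layered dynamic program
-- (pal(j,L) = col[j]==col[j+L-1] && pal(j+1,L-2)), growing all windows two characters per
-- layer, with closed forms for the degenerate cases (objective: alternative).

-- ===== PORT A =====
-- arr[r][i] with out-of-range defaulted; inside Pre_ every access is in range, so this equals Python's value
def pvCh (arr : List String) (r i : Int) : Char :=
  (PySem.Str.pyGet? (PySem.List.pyGetD arr r "") i).getD ' '

-- the inner 'for k in range(M//2): if …: flag=0; break' loop, returning flag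
def pvFlag (arr : List String) (i j M : Int) : List Int → Int
  | [] => 1
  | k :: ks => if pvCh arr (j + k) i ≠ pvCh arr (j + M - 1 - k) i then 0
               else pvFlag arr i j M ks

def count_col (arr : List String) (N : Int) (M : Int) : Int :=
  (PySem.List.pyRange 0 N 1).foldl (fun cnt i =>
    (PySem.List.pyRange 0 (N - M + 1) 1).foldl (fun cnt j =>
      let flag := pvFlag arr i j M (PySem.List.pyRange 0 (PySem.Int.floordiv M 2) 1)
      if flag ≠ 0 then cnt + 1 else cnt) cnt) 0

-- ===== PORT B =====
-- column i of the first N rows: [row[i] for row in arr[:N]] (out-of-range defaulted; in range under Pre_)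
def pvCol (arr : List String) (N i : Int) : List Char :=
  (PySem.List.slice arr (some 0) (some N)).map (fun row => (PySem.Str.pyGet? row i).getD ' ')

-- one DP layer: [col[j] == col[j+L-1] and ok[j+1] for j in range(N-L+1)]
-- (indices defaulted; in range under Pre_)
def pvStep (col : List Char) (N L : Int) (ok : List Bool) : List Bool :=
  (PySem.List.pyRange 0 (N - L + 1) 1).map (fun j =>
    decide (PySem.List.pyGetD col j ' ' = PySem.List.pyGetD col (j + L - 1) ' ') &&
    PySem.List.pyGetD ok (j + 1) false)

-- the 'while L < M' loop; it runs exactly (M - M%2)/2 = M//2 times, which is the fuel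
def pvLayers (col : List Char) (N : Int) : Nat → Int → List Bool → List Bool
  | 0, _, ok => ok
  | t+1, L, ok => pvLayers col N t (L + 2) (pvStep col N (L + 2) ok)

def count_col_alt (arr : List String) (N : Int) (M : Int) : Int :=
  if N ≤ 0 ∨ M > N then 0
  else if M ≤ 1 then N * (N - M + 1)
  else
    (PySem.List.pyRange 0 N 1).foldl (fun total i =>
      let col := pvCol arr N i
      let okF := pvLayers col N (PySem.Int.floordiv M 2).toNat (PySem.Int.mod M 2)
                   (List.replicate (N - PySem.Int.mod M 2 + 1).toNat true)
      total + okF.foldl (fun s b => s + if b then (1:Int) else 0) 0) 0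

-- ===== PRECONDITION & SPEC =====
-- Pre_ excludes the inputs on which A's column accesses arr[r][i] can go out of range (2 ≤ M ≤ N but the
-- first N rows do not form a full N×N grid): there A raises IndexError, except for rare inputs where every
-- window already fails at its first character pair, on which A returns but B (which reads whole columns) raises.
def Pre_count_col (arr : List String) (N : Int) (M : Int) : Prop :=
  (2 ≤ M ∧ M ≤ N) → (N ≤ (arr.length : Int) ∧ ∀ s ∈ arr.take N.toNat, N ≤ (s.length : Int))
instance (arr : List String) (N : Int) (M : Int) : Decidable (Pre_count_col arr N M) := by
  unfold Pre_count_col; infer_instance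

def pvWitness_count_col : List String × Int × Int := (["aba", "bcb", "axa"], 3, 3)

def Spec_count_col (arr : List String) (N : Int) (M : Int) (out : Int) : Prop := out = count_col_alt arr N M
instance (arr : List String) (N : Int) (M : Int) (out : Int) : Decidable (Spec_count_col arr N M out) := by unfold Spec_count_col; infer_instance

-- ===== CLAIM (what is proved, stated in full; the proofs are below) =====
def Claim_equal_count_col : Prop := ∀ (arr : List String) (N : Int) (M : Int), Dom_count_col arr N M → Pre_count_col arr N M → Spec_count_col arr N M (count_col arr N M)

-- ===== LEMMAS AND PROOFS =====

theorem pvWitness_ok :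
    Dom_count_col pvWitness_count_col.1 pvWitness_count_col.2.1 pvWitness_count_col.2.2 ∧
    Pre_count_col pvWitness_count_col.1 pvWitness_count_col.2.1 pvWitness_count_col.2.2 := by
  decide

-- the flag loop returns 1 iff every inspected pair of characters matches (and is 0 or 1)
theorem pvFlag_ne_zero_iff (arr : List String) (i j M : Int) (l : List Int) :
    (pvFlag arr i j M l ≠ 0) ↔ ∀ k ∈ l, pvCh arr (j + k) i = pvCh arr (j + M - 1 - k) i := by
  induction l with
  | nil => simp [pvFlag]
  | cons k ks ih =>
    by_cases h : pvCh arr (j + k) i = pvCh arr (j + M - 1 - k) i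
    · simp [pvFlag, h, ih]
    · simp [pvFlag, h]

-- the layered DP, characterized: after t layers starting from window length l, entry j says
-- that all t outermost character pairs of the length-(l+2t) window at j match, conjoined
-- with the starting table's entry t positions further right
theorem pvLayers_eq (col : List Char) (N : Int) :
    ∀ (t l : Nat) (f : Nat → Bool), ((l : Int) + 2 * t ≤ N) →
      pvLayers col N t (l : Int) ((List.range (N - (l:Int) + 1).toNat).map f) =
      (List.range (N - (l:Int) - 2 * (t:Int) + 1).toNat).map
        (fun j => f (j + t) &&
          (List.range t).all (fun s => col.getD (j + s) ' ' == col.getD (j + l + 2*t - 1 - s) ' ')) := by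
  intro t
  induction t with
  | zero =>
    intro l f _
    simp [pvLayers]
  | succ t ih =>
    intro l f hle
    have hstep : pvStep col N ((l:Int) + 2) ((List.range (N - (l:Int) + 1).toNat).map f) =
        (List.range (N - ((l+2 : Nat):Int) + 1).toNat).map
          (fun j => decide (col.getD j ' ' = col.getD (j + l + 1) ' ') && f (j + 1)) := by
      unfold pvStep
      rw [PySem.List.pyRange_one]
      rw [List.map_map]
      rw [show (N - ((l:Int) + 2) + 1 - 0).toNat = (N - ((l+2 : Nat):Int) + 1).toNat from by
        push_cast; omega]
      apply List.map_congr_left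
      intro k hk
      rw [List.mem_range] at hk
      have hk' : (k : Int) < N - (l:Int) - 1 := by
        have : (k:Int) < ((N - ((l+2:Nat):Int) + 1).toNat : Int) := by exact_mod_cast hk
        push_cast at this ⊢
        omega
      have h1 : (0 : Int) + (k:Int) = ((k : Nat) : Int) := by ring
      have h2 : (k:Int) + ((l:Int) + 2) - 1 = ((k + l + 1 : Nat) : Int) := by push_cast; ring
      have h3 : (k:Int) + 1 = ((k + 1 : Nat) : Int) := by push_cast; ring
      simp only [Function.comp_apply, h1]
      simp only [h2, h3, PySem.List.pyGetD_natCast]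
      congr 1
      rw [List.getD_eq_getElem?_getD, List.getElem?_map, List.getElem?_range (by omega : k + 1 < (N - (l:Int) + 1).toNat)]
      simp
    show pvLayers col N t ((l:Int) + 2) (pvStep col N ((l:Int) + 2) ((List.range (N - (l:Int) + 1).toNat).map f)) = _
    rw [hstep]
    have hcast : ((l + 2 : Nat) : Int) = (l : Int) + 2 := by push_cast; ring
    rw [show pvLayers col N t ((l:Int) + 2) = pvLayers col N t ((l + 2 : Nat) : Int) from by rw [hcast]]
    rw [ih (l + 2) _ (by push_cast at hle ⊢; omega)]
    have hrange : (N - ((l + 2 : Nat):Int) - 2 * (t:Int) + 1).toNat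
        = (N - (l:Int) - 2 * ((t + 1 : Nat):Int) + 1).toNat := by push_cast; omega
    rw [hrange]
    apply List.map_congr_left
    intro j hj
    rw [List.mem_range] at hj
    -- split the (t+1)-pair test into the outermost pair and the inner t pairs
    rw [show List.range (t + 1) = List.range t ++ [t] from List.range_succ]
    rw [List.all_append]
    simp only [List.all_cons, List.all_nil, Bool.and_true]
    have houter : (decide (col.getD (j + t) ' ' = col.getD (j + t + l + 1) ' ')
        : Bool) = (col.getD (j + t) ' ' == col.getD (j + l + 2*(t+1) - 1 - t) ' ') := by
      rw [show j + l + 2*(t+1) - 1 - t = j + t + l + 1 from by omega]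
      rw [Bool.beq_eq_decide_eq]
    have hinner : (fun s => col.getD (j + s) ' ' == col.getD (j + (l + 2) + 2*t - 1 - s) ' ')
        = (fun s : Nat => col.getD (j + s) ' ' == col.getD (j + l + 2*(t+1) - 1 - s) ' ') := by
      funext s
      rw [show j + (l + 2) + 2*t - 1 - s = j + l + 2*(t+1) - 1 - s from by omega]
    rw [hinner]
    rw [show j + t + 1 = j + (t + 1) from by omega]
    rw [← houter]
    cases f (j + (t + 1)) <;> cases (List.range t).all
        (fun s => col.getD (j + s) ' ' == col.getD (j + l + 2*(t+1) - 1 - s) ' ') <;> simp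

-- sum(ok) over booleans counts the Trues
theorem pvSumBool (u : List Bool) : ∀ s : Int,
    u.foldl (fun s b => s + if b then (1:Int) else 0) s = s + (u.countP (fun b => b) : Int) := by
  induction u with
  | nil => simp
  | cons b bs ih =>
    intro s
    cases b <;> simp only [List.foldl_cons, List.countP_cons, ih] <;> push_cast <;> ring_nf

-- A's per-window flag loop succeeds iff B's DP pair test for that window holds
theorem pvWindow (arr : List String) (N M i j : Int) (t l : Nat)
    (hM2 : 2 ≤ M) (_hMN : M ≤ N)
    (hlen : N ≤ (arr.length : Int)) (hrows : ∀ s ∈ arr.take N.toNat, N ≤ (s.length : Int))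
    (hi0 : 0 ≤ i) (hiN : i < N) (hj0 : 0 ≤ j) (hjN : j < N - M + 1)
    (ht : (t : Int) = PySem.Int.floordiv M 2) (hl : (l : Int) = PySem.Int.mod M 2) :
    (pvFlag arr i j M (PySem.List.pyRange 0 (PySem.Int.floordiv M 2) 1) ≠ 0) ↔
    ((List.range t).all (fun s => (pvCol arr N i).getD (j.toNat + s) ' '
        == (pvCol arr N i).getD (j.toNat + l + 2*t - 1 - s) ' ') = true) := by
  have hfd := PySem.Int.floordiv_mul_add_mod M 2
  have hm0 := PySem.Int.mod_nonneg M (show (0:Int) < 2 by omega)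
  have hm2 := PySem.Int.mod_lt M (show (0:Int) < 2 by omega)
  set n := N.toNat with hn'
  have hM : (l : Int) + 2 * (t : Int) = M := by omega
  have hgrow : ∀ k : Nat, k < n → k < arr.length ∧ N ≤ (arr[k]!.toList.length : Int) := by
    intro k hk
    have hkl : k < arr.length := by omega
    have hmem : arr[k] ∈ arr.take n := by
      rw [show arr[k] = (arr.take n)[k]'(by simp; omega) from (List.getElem_take).symm]
      exact List.getElem_mem _
    have := hrows _ hmem
    refine ⟨hkl, ?_⟩
    rw [getElem!_pos arr k hkl, String.length_toList]
    exact this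
  have hcolD : ∀ k : Nat, k < n → (pvCol arr N i).getD k ' ' = arr[k]!.toList.getD i.toNat ' ' := by
    intro k hk
    have hkl : k < arr.length := by omega
    unfold pvCol
    rw [List.getD_eq_getElem?_getD]
    rw [PySem.List.slice_zero_start, PySem.List.slice_to _ (by omega)]
    rw [← hn', List.getElem?_map, List.getElem?_take_of_lt hk, List.getElem?_eq_getElem hkl]
    have hil : i < (arr[k].toList.length : Int) := by
      have := (hgrow k hk).2; rw [getElem!_pos arr k hkl] at this; omega
    simp only [Option.map_some, Option.getD_some, getElem!_pos arr k hkl]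
    simp [PySem.List.pyGet?_of_nonneg_of_lt _ hi0 (by exact_mod_cast hil),
          List.getD_eq_getElem?_getD]
  have hch : ∀ r : Int, 0 ≤ r → r < N → pvCh arr r i = arr[r.toNat]!.toList.getD i.toNat ' ' := by
    intro r hr0 hrN
    have hrl : r < (arr.length : Int) := by omega
    have hrn : r.toNat < n := by omega
    unfold pvCh
    rw [PySem.List.pyGetD_eq_getElem arr "" hr0 hrl]
    have hil : i < (arr[r.toNat]'(by omega) |>.toList.length : Int) := by
      have := (hgrow r.toNat hrn).2; rw [getElem!_pos arr r.toNat (by omega)] at this; omega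
    rw [getElem!_pos arr r.toNat (by omega)]
    simp [PySem.List.pyGet?_of_nonneg_of_lt _ hi0 (by exact_mod_cast hil),
          List.getD_eq_getElem?_getD]
  have hmir : ∀ r : Int, 0 ≤ r → r < N →
      pvCh arr r i = (pvCol arr N i).getD r.toNat ' ' := by
    intro r hr0 hrN
    rw [hch r hr0 hrN, hcolD r.toNat (by omega)]
  rw [pvFlag_ne_zero_iff, List.all_eq_true]
  constructor
  · intro hp s hs
    rw [List.mem_range] at hs
    have := hp (s : Int) (by rw [PySem.List.mem_pyRange_one]; omega)
    rw [hmir _ (by omega) (by omega), hmir _ (by omega) (by omega)] at this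
    rw [show (j + (s:Int)).toNat = j.toNat + s from by omega,
        show (j + M - 1 - (s:Int)).toNat = j.toNat + l + 2*t - 1 - s from by omega] at this
    simp only [beq_iff_eq]
    exact this
  · intro hp k hk
    rw [PySem.List.mem_pyRange_one] at hk
    have := hp k.toNat (by rw [List.mem_range]; omega)
    simp only [beq_iff_eq] at this
    rw [hmir _ (by omega) (by omega), hmir _ (by omega) (by omega)]
    rw [show (j + k).toNat = j.toNat + k.toNat from by omega,
        show (j + M - 1 - k).toNat = j.toNat + l + 2*t - 1 - k.toNat from by omega]
    exact this

-- ===== VERDICT (by name: the statement is the Claim_ definition above) =====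
theorem count_col_spec : Claim_equal_count_col := by
  intro arr N M _dom pre
  unfold Spec_count_col count_col count_col_alt
  by_cases hN : N ≤ 0
  · rw [PySem.List.pyRange_one_eq_nil hN]
    simp [hN]
  · replace hN : 0 < N := by omega
    by_cases hMN : N < M
    · rw [PySem.List.pyRange_one_eq_nil (show N - M + 1 ≤ 0 by omega)]
      rw [if_pos (Or.inr hMN)]
      simp only [List.foldl_nil]
      exact List.foldl_fixed _
    · by_cases hM1 : M ≤ 1
      · have hh : PySem.Int.floordiv M 2 ≤ 0 := by
          have := (PySem.Int.floordiv_lt_iff_lt_mul (a := M) (b := 2) (q := 1) (by omega)).2 (by omega)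
          omega
        rw [PySem.List.pyRange_one_eq_nil hh]
        simp only [pvFlag]
        rw [if_neg (show ¬ (N ≤ 0 ∨ M > N) by omega), if_pos hM1]
        have hbody : ∀ cnt : Int,
            (PySem.List.pyRange 0 (N - M + 1) 1).foldl
              (fun cnt _ => if (1 : Int) ≠ 0 then cnt + 1 else cnt) cnt = cnt + (N - M + 1) := by
          intro cnt
          simp only [ne_eq, one_ne_zero, not_false_eq_true, if_true]
          rw [PySem.List.foldl_add (g := fun _ => 1)]
          simp [PySem.List.length_pyRange_one]
          omega
        refine Eq.trans (PySem.List.foldl_congr_mem (g := fun cnt (_ : Int) => cnt + (N - M + 1))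
              _ _ _ (fun acc x _ => hbody acc)) ?_
        rw [PySem.List.foldl_add (g := fun _ => N - M + 1)]
        rw [PySem.List.sum_map_const_int, PySem.List.length_pyRange_one]
        have hc : ((N - 0).toNat : Int) = N := by omega
        rw [hc]; ring
      · -- main case: 2 ≤ M ≤ N
        obtain ⟨hlen, hrows⟩ := pre ⟨by omega, by omega⟩
        have hfd := PySem.Int.floordiv_mul_add_mod M 2
        have hm0 := PySem.Int.mod_nonneg M (show (0:Int) < 2 by omega)
        have hm2 := PySem.Int.mod_lt M (show (0:Int) < 2 by omega)
        set t := (PySem.Int.floordiv M 2).toNat with ht'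
        set l := (PySem.Int.mod M 2).toNat with hl'
        have ht : (t : Int) = PySem.Int.floordiv M 2 := by omega
        have hl : (l : Int) = PySem.Int.mod M 2 := by omega
        simp only [show ¬ (N ≤ 0 ∨ M > N) by omega, if_false, show ¬ M ≤ 1 by omega]
        apply PySem.List.foldl_congr_mem
        intro acc i hi
        rw [PySem.List.mem_pyRange_one] at hi
        -- rewrite B's column DP with its characterization
        have hrep : List.replicate (N - PySem.Int.mod M 2 + 1).toNat true
            = (List.range (N - (l:Int) + 1).toNat).map (fun _ => true) := by
          rw [List.map_const', List.length_range, hl]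
        have hokF : pvLayers (pvCol arr N i) N t (PySem.Int.mod M 2)
              (List.replicate (N - PySem.Int.mod M 2 + 1).toNat true)
            = (List.range (N - (l:Int) - 2*(t:Int) + 1).toNat).map
                (fun j => (List.range t).all (fun s => (pvCol arr N i).getD (j + s) ' '
                    == (pvCol arr N i).getD (j + l + 2*t - 1 - s) ' ')) := by
          rw [hrep, ← hl, pvLayers_eq (pvCol arr N i) N t l (fun _ => true) (by omega)]
          simp
        rw [hokF]
        have hK : (N - (l:Int) - 2*(t:Int) + 1).toNat = (N - M + 1 - 0).toNat := by omega
        rw [hK]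
        rw [pvSumBool, List.countP_map]
        -- rewrite A's inner loop as a count
        rw [PySem.List.foldl_ite_add_one
              (p := fun j => pvFlag arr i j M (PySem.List.pyRange 0 (PySem.Int.floordiv M 2) 1) ≠ 0)]
        rw [show PySem.List.pyRange 0 (N - M + 1) 1
              = (List.range (N - M + 1 - 0).toNat).map (fun k : Nat => (0:Int) + (k:Int))
            from PySem.List.pyRange_one 0 (N - M + 1)]
        rw [List.countP_map]
        simp only [zero_add]
        congr 2
        apply List.countP_congr
        intro jn hjn
        rw [List.mem_range] at hjn
        simp only [Function.comp_apply]
        have hwin := pvWindow arr N M i (jn : Int) t l (by omega) (by omega) hlen hrows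
            hi.1 hi.2 (by omega) (by omega) ht hl
        rw [show ((jn : Int)).toNat = jn from by omega] at hwin
        simp only [decide_eq_true_eq]
        exact hwin
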